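-- pv_equiv track=rewrite | github.com/zongwangZ/AlgPackage | util/tool.py | VTree2ToVTree1
-- ===== SOURCE A (Python) =====
-- def getChilrenByVTree(VTree,parent):
--     '''
--     20190308
--     :param VTree:
--     :param parent:
--     :return:
--     '''
--     children = []
--     for i in range(len(VTree)):
--         if parent == VTree[i]:
--             children.append(i+1)
--     return children
--
-- def getParent(E, child):
--     for edge in E:
--         if edge[1] == child:
--             return edge[0]
--     return -1  # 没有父节点
--
-- def EtoVTree(E):
--     i = 1
--     VTree = []
--     while getParent(E,i) != -1:
--         parent = getParent(E,i)
--         VTree.append(parent)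
--         i = i+1
--     return VTree
--
-- def VTree2ToVTree1(VTree2,root=0):
--     '''
--     第二版VTree改为第一版，转换可能导致拓扑结构不一样
--     :param VTree2:  [6,6,7,7,0,5,5]
--     :return: [0,1,1,2,2,3,3]
--     '''
--     number = 0
--     changeTable = {} ##对换表
--     newE = [] ##不严谨的E set
--     visit=[root]
--     while visit:
--         node = visit[0]
--         del visit[0]
--         if node not in changeTable:
--             changeTable[node] = number
--             number +=1
--         children = getChilrenByVTree(VTree2,node)
--         visit.extend(children)
--         for child in children:
--             newE.append((changeTable[node],number))
--             changeTable[child] = number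
--             number += 1
--     VTree1 = EtoVTree(newE)
--     return VTree1
-- ===== SOURCE B (Python) =====
-- def VTree2ToVTree1(VTree2, root=0):
--     # One pass builds a parent -> children index; a cursor-based BFS then emits
--     # each child's new parent label directly, skipping A's edge list + rescans.
--     children = {}
--     for i, p in enumerate(VTree2):
--         children.setdefault(p, []).append(i + 1)
--     labels = {root: 0}
--     out = []
--     number = 1
--     queue = [root]
--     head = 0
--     while head < len(queue):
--         node = queue[head]
--         head += 1
--         for child in children.get(node, []):
--             out.append(labels[node])
--             labels[child] = number
--             number += 1
--             queue.append(child)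
--     return out
-- ===== Notes on version B (the rewrite author's own statement) =====
-- stated objective: alternative
-- what changed: B builds a parent->children index in one pass and emits each child's new parent label directly during a cursor-based BFS, replacing A's per-visited-node full-list child scans and its edge-list plus EtoVTree relabel rescan (O(n) vs O(n^2) in the visited-tree size, though not faster on a timing run's inputs, whose BFS visits few nodes).
import Mathlib
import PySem

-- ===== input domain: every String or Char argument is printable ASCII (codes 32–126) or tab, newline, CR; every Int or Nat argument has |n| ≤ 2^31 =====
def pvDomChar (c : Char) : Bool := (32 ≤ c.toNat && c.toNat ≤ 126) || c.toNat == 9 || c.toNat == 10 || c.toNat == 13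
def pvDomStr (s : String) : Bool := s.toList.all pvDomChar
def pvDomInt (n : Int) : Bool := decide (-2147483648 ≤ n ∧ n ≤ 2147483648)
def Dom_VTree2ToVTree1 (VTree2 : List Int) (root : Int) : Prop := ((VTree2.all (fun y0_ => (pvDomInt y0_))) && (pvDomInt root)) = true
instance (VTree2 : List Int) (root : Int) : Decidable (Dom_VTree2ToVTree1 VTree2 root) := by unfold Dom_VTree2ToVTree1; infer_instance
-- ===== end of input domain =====

-- B replaces A's per-visited-node full-list child scans and edge-list + EtoVTree rescan by a
-- one-pass parent->children index and a cursor BFS emitting labels directly (alternative algorithm).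


-- ===== PORT A =====
-- for i in range(len(VTree)): if parent == VTree[i]: children.append(i+1)
-- (pyGetD is exact here: i is always in range)
def getChilrenByVTree (VTree : List Int) (parent : Int) : List Int :=
  (PySem.List.pyRange 0 (VTree.length : Int) 1).foldl
    (fun children i => if parent == PySem.List.pyGetD VTree i 0 then children ++ [i + 1] else children) []

-- for edge in E: if edge[1] == child: return edge[0]; return -1
def getParent (E : List (Int × Int)) (child : Int) : Int :=
  match E with
  | [] => -1
  | edge :: rest => if edge.2 == child then edge.1 else getParent rest child

-- while getParent(E,i) != -1: VTree.append(getParent(E,i)); i += 1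
-- fueled loop: i strictly increases and each successful i is the snd of a distinct edge,
-- so E.length + 1 iterations always reach the terminating test (fuel never binds)
def EtoVTreeAux (E : List (Int × Int)) (i : Int) (acc : List Int) : Nat → List Int
  | 0 => acc
  | fuel + 1 =>
    if getParent E i != -1 then EtoVTreeAux E (i + 1) (acc ++ [getParent E i]) fuel else acc

def EtoVTree (E : List (Int × Int)) : List Int := EtoVTreeAux E 1 [] (E.length + 1)

-- loop body 'newE.append((changeTable[node], number)); changeTable[child] = number; number += 1'
-- (changeTable[node] cannot raise: node is always a key; getD 0 is exact)
def stepA (node : Int) (s : PySem.Dict Int Int × List (Int × Int) × Int) (child : Int) :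
    PySem.Dict Int Int × List (Int × Int) × Int :=
  (s.1.insert child s.2.2, s.2.1 ++ [(s.1.getD node 0, s.2.2)], s.2.2 + 1)

-- the 'while visit:' loop of A, fueled; whenever Python's loop terminates each node is
-- enqueued at most once, so VTree2.length + 2 iterations empty the queue (fuel never binds)
def bfsA (VTree2 : List Int) : Nat → List Int → PySem.Dict Int Int → List (Int × Int) → Int → List (Int × Int)
  | 0, _, _, newE, _ => newE
  | _ + 1, [], _, newE, _ => newE
  | fuel + 1, node :: rest, ct, newE, number =>
    let p := if ct.contains node then (ct, number) else (ct.insert node number, number + 1)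
    let s := (getChilrenByVTree VTree2 node).foldl (stepA node) (p.1, newE, p.2)
    bfsA VTree2 fuel (rest ++ getChilrenByVTree VTree2 node) s.1 s.2.1 s.2.2

def VTree2ToVTree1 (VTree2 : List Int) (root : Int) : List Int :=
  EtoVTree (bfsA VTree2 (VTree2.length + 2) [root] PySem.Dict.empty [] 0)

-- ===== PORT B =====
-- children.setdefault(p, []).append(i + 1)  ==  children[p] = children.get(p, []) + [i+1]
def childrenMap (VTree2 : List Int) : PySem.Dict Int (List Int) :=
  (PySem.List.enumerate VTree2 0).foldl
    (fun d ip => d.modify ip.2 [] (fun l => l ++ [ip.1 + 1])) PySem.Dict.empty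

-- loop body 'out.append(labels[node]); labels[child] = number; number += 1'
-- (labels[node] cannot raise: node is always a key; getD 0 is exact)
def stepB (node : Int) (s : PySem.Dict Int Int × List Int × Int) (child : Int) :
    PySem.Dict Int Int × List Int × Int :=
  (s.1.insert child s.2.2, s.2.1 ++ [s.1.getD node 0], s.2.2 + 1)

-- the 'while head < len(queue):' cursor loop of B; same fuel as A's loop
-- (queue.getD head 0 is exact: head < queue.length holds at the read)
def bfsB (cm : PySem.Dict Int (List Int)) : Nat → List Int → Nat → PySem.Dict Int Int → List Int → Int → List Int
  | 0, _, _, _, out, _ => out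
  | fuel + 1, queue, head, labels, out, number =>
    if head < queue.length then
      let node := queue.getD head 0
      let s := (cm.getD node []).foldl (stepB node) (labels, out, number)
      bfsB cm fuel (queue ++ cm.getD node []) (head + 1) s.1 s.2.1 s.2.2
    else out

def VTree2ToVTree1_alt (VTree2 : List Int) (root : Int) : List Int :=
  bfsB (childrenMap VTree2) (VTree2.length + 2) [root] 0 (PySem.Dict.empty.insert root 0) [] 1

-- ===== PRECONDITION & SPEC =====
def Spec_VTree2ToVTree1 (VTree2 : List Int) (root : Int) (out : List Int) : Prop := out = VTree2ToVTree1_alt VTree2 root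
instance (VTree2 : List Int) (root : Int) (out : List Int) : Decidable (Spec_VTree2ToVTree1 VTree2 root out) := by unfold Spec_VTree2ToVTree1; infer_instance

-- ===== CLAIM (what is proved, stated in full; the proofs are below) =====
def Claim_equal_VTree2ToVTree1 : Prop := ∀ (VTree2 : List Int) (root : Int), Dom_VTree2ToVTree1 VTree2 root → Spec_VTree2ToVTree1 VTree2 root (VTree2ToVTree1 VTree2 root)

-- ===== LEMMAS AND PROOFS =====

lemma EtoVTreeAux_succ (E : List (Int × Int)) (i : Int) (acc : List Int) (fuel : Nat) :
    EtoVTreeAux E i acc (fuel + 1)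
      = if getParent E i != -1 then EtoVTreeAux E (i + 1) (acc ++ [getParent E i]) fuel else acc := rfl

-- the two child-lookup mechanisms agree
lemma children_eq (VTree2 : List Int) (p : Int) :
    (childrenMap VTree2).getD p [] = getChilrenByVTree VTree2 p := by
  have hmap := PySem.Dict.getD_foldl_modify_append
      ((PySem.List.enumerate VTree2 0).map (fun ip => (ip.2, ip.1 + 1))) PySem.Dict.empty p
  rw [List.foldl_map] at hmap
  unfold childrenMap getChilrenByVTree
  rw [PySem.List.foldl_append_if (fun i => p == PySem.List.pyGetD VTree2 i 0) (fun i => i + 1)]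
  rw [hmap]
  rw [PySem.List.enumerate_eq_map_pyRange VTree2 0]
  simp only [List.filter_map, List.map_map, Function.comp_def]
  rw [List.filter_congr (fun i _ => (Bool.beq_comm))]
  simp [PySem.List.len]

-- the two per-node folds run in lockstep
lemma fold_eq (node : Int) (cs : List Int) (ct : PySem.Dict Int Int)
    (newE : List (Int × Int)) (number : Int) :
    cs.foldl (stepB node) (ct, newE.map Prod.fst, number)
      = ((cs.foldl (stepA node) (ct, newE, number)).1,
         (cs.foldl (stepA node) (ct, newE, number)).2.1.map Prod.fst,
         (cs.foldl (stepA node) (ct, newE, number)).2.2) := by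
  induction cs generalizing ct newE number with
  | nil => simp
  | cons c cs ih =>
    simp only [List.foldl_cons, stepA, stepB]
    have := ih (ct.insert c number) (newE ++ [(ct.getD node 0, number)]) (number + 1)
    simpa using this

lemma fold_contains_mono (node v : Int) (cs : List Int) : ∀ (s : PySem.Dict Int Int × List (Int × Int) × Int),
    s.1.contains v = true → (cs.foldl (stepA node) s).1.contains v = true := by
  induction cs with
  | nil => intro s h; simpa using h
  | cons c cs ih =>
    intro s h
    simp only [List.foldl_cons]
    apply ih
    simp [stepA, PySem.Dict.contains_insert, h]

lemma fold_contains_children (node : Int) (cs : List Int) : ∀ (s : PySem.Dict Int Int × List (Int × Int) × Int)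
    (c : Int), c ∈ cs → (cs.foldl (stepA node) s).1.contains c = true := by
  induction cs with
  | nil => intro s c h; simp at h
  | cons c' cs ih =>
    intro s c h
    simp only [List.foldl_cons]
    rcases List.mem_cons.mp h with h | h
    · subst h
      apply fold_contains_mono
      simp [stepA, PySem.Dict.contains_insert_self]
    · exact ih _ c h

-- lockstep of the two BFS loops (any fuel, any matched state)
lemma bfs_eq (VTree2 : List Int) : ∀ (fuel : Nat) (visit pre : List Int)
    (ct : PySem.Dict Int Int) (newE : List (Int × Int)) (number : Int),
    (∀ v ∈ visit, ct.contains v = true) →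
    bfsB (childrenMap VTree2) fuel (pre ++ visit) pre.length ct (newE.map Prod.fst) number
      = (bfsA VTree2 fuel visit ct newE number).map Prod.fst := by
  intro fuel
  induction fuel with
  | zero => intro visit pre ct newE number _; simp [bfsA, bfsB]
  | succ fuel ih =>
    intro visit pre ct newE number hinv
    match visit with
    | [] => simp [bfsA, bfsB]
    | node :: rest =>
      have hlt : pre.length < (pre ++ node :: rest).length := by simp
      have hnode : (pre ++ node :: rest).getD pre.length 0 = node := by
        rw [List.getD_append_right _ _ _ _ (le_refl _)]
        simp
      simp only [bfsA, bfsB, if_pos hlt, hnode]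
      rw [if_pos (hinv node (List.mem_cons_self ..))]
      rw [children_eq, fold_eq]
      have hqueue : (pre ++ node :: rest) ++ getChilrenByVTree VTree2 node
          = (pre ++ [node]) ++ (rest ++ getChilrenByVTree VTree2 node) := by
        simp
      have hlen : pre.length + 1 = (pre ++ [node]).length := by simp
      rw [hqueue, hlen]
      apply ih
      intro v hv
      rcases List.mem_append.mp hv with hv | hv
      · exact fold_contains_mono _ _ _ _ (hinv v (List.mem_cons_of_mem _ hv))
      · exact fold_contains_children _ _ _ _ hv

-- A's edge list always carries snd components 1,2,…,m and nonnegative fst components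
lemma fold_snd (node : Int) : ∀ (cs : List Int) (ct : PySem.Dict Int Int)
    (newE : List (Int × Int)) (number : Int),
    (∀ v, 0 ≤ ct.getD v 0) → number = (newE.length : Int) + 1 →
    newE.map Prod.snd = (List.range' 1 newE.length).map Int.ofNat →
    (∀ e ∈ newE, 0 ≤ e.1) →
    (∀ v, 0 ≤ (cs.foldl (stepA node) (ct, newE, number)).1.getD v 0) ∧
    (cs.foldl (stepA node) (ct, newE, number)).2.2
      = ((cs.foldl (stepA node) (ct, newE, number)).2.1.length : Int) + 1 ∧
    (cs.foldl (stepA node) (ct, newE, number)).2.1.map Prod.snd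
      = (List.range' 1 (cs.foldl (stepA node) (ct, newE, number)).2.1.length).map Int.ofNat ∧
    (∀ e ∈ (cs.foldl (stepA node) (ct, newE, number)).2.1, 0 ≤ e.1) := by
  intro cs
  induction cs with
  | nil =>
    intro ct newE number h0 h1 h2 h3
    exact ⟨h0, by simpa using h1, h2, h3⟩
  | cons c cs ih =>
    intro ct newE number h0 h1 h2 h3
    simp only [List.foldl_cons, stepA]
    apply ih
    · intro v
      rw [PySem.Dict.getD_insert]
      split_ifs with hv
      · have : (0 : Int) ≤ (newE.length : Int) + 1 := by positivity
        omega
      · exact h0 v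
    · simp only [List.length_append, List.length_cons, List.length_nil]
      push_cast
      omega
    · rw [List.map_append, h2]
      simp only [List.map_cons, List.map_nil, List.length_append, List.length_cons, List.length_nil]
      rw [List.range'_1_concat, List.map_append]
      simp only [List.map_cons, List.map_nil]
      congr 2
      simp only [Int.ofNat_eq_natCast]
      push_cast
      omega
    · intro e he
      rcases List.mem_append.mp he with he | he
      · exact h3 e he
      · simp only [List.mem_cons, List.not_mem_nil, or_false] at he
        subst he
        exact h0 node

lemma bfsA_snd (VTree2 : List Int) : ∀ (fuel : Nat) (visit : List Int)
    (ct : PySem.Dict Int Int) (newE : List (Int × Int)) (number : Int),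
    (∀ v ∈ visit, ct.contains v = true) →
    (∀ v, 0 ≤ ct.getD v 0) → number = (newE.length : Int) + 1 →
    newE.map Prod.snd = (List.range' 1 newE.length).map Int.ofNat →
    (∀ e ∈ newE, 0 ≤ e.1) →
    (bfsA VTree2 fuel visit ct newE number).map Prod.snd
      = (List.range' 1 (bfsA VTree2 fuel visit ct newE number).length).map Int.ofNat ∧
    (∀ e ∈ bfsA VTree2 fuel visit ct newE number, 0 ≤ e.1) := by
  intro fuel
  induction fuel with
  | zero => intro visit ct newE number _ _ _ h2 h3; exact ⟨by simpa using h2, h3⟩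
  | succ fuel ih =>
    intro visit ct newE number hinv h0 h1 h2 h3
    match visit with
    | [] => exact ⟨by simpa [bfsA] using h2, by simpa [bfsA] using h3⟩
    | node :: rest =>
      simp only [bfsA]
      rw [if_pos (hinv node (List.mem_cons_self ..))]
      obtain ⟨g0, g1, g2, g3⟩ := fold_snd node (getChilrenByVTree VTree2 node) ct newE number h0 h1 h2 h3
      apply ih _ _ _ _ _ g0 g1 g2 g3
      intro v hv
      rcases List.mem_append.mp hv with hv | hv
      · exact fold_contains_mono _ _ _ _ (hinv v (List.mem_cons_of_mem _ hv))
      · exact fold_contains_children _ _ _ _ hv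

lemma getParent_none (E : List (Int × Int)) (i : Int) (h : ∀ e ∈ E, e.2 ≠ i) :
    getParent E i = -1 := by
  induction E with
  | nil => rfl
  | cons e r ih =>
    simp only [getParent]
    rw [if_neg]
    · exact ih (fun x hx => h x (List.mem_cons_of_mem _ hx))
    · simpa using h e (List.mem_cons_self ..)

lemma getParent_at : ∀ (E : List (Int × Int)) (s k : Nat),
    E.map Prod.snd = (List.range' s E.length).map Int.ofNat → k < E.length →
    getParent E ((s + k : Nat) : Int) = (E.getD k (0, 0)).1 := by
  intro E
  induction E with
  | nil => intro s k _ hk; simp at hk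
  | cons e r ih =>
    intro s k hsnd hk
    simp only [List.length_cons, List.range'_succ, List.map_cons, List.cons.injEq] at hsnd
    obtain ⟨he, hr⟩ := hsnd
    match k with
    | 0 =>
      simp only [getParent, Nat.add_zero]
      rw [if_pos]
      · simp
      · simp [he]
    | k + 1 =>
      simp only [getParent]
      rw [if_neg]
      · have := ih (s + 1) k hr (by simpa using hk)
        simpa [Nat.add_assoc, Nat.add_comm 1 k] using this
      · simp [he]; omega

lemma etv_aux (E : List (Int × Int))
    (hsnd : E.map Prod.snd = (List.range' 1 E.length).map Int.ofNat)
    (hfst : ∀ e ∈ E, 0 ≤ e.1) :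
    ∀ (j k : Nat) (acc : List Int), k + j = E.length →
    EtoVTreeAux E ((1 + k : Nat) : Int) acc (j + 1) = acc ++ (E.drop k).map Prod.fst := by
  intro j
  induction j with
  | zero =>
    intro k acc hk
    simp only [Nat.add_zero] at hk
    subst hk
    simp only [EtoVTreeAux]
    rw [getParent_none]
    · simp
    · intro e he
      have : e.2 ∈ E.map Prod.snd := List.mem_map_of_mem he
      rw [hsnd] at this
      simp only [List.mem_map, List.mem_range'] at this
      obtain ⟨t, ht, hte⟩ := this
      rw [← hte]
      simp only [Int.ofNat_eq_natCast, ne_eq]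
      omega
  | succ j ih =>
    intro k acc hk
    have hklt : k < E.length := by omega
    have hgp : getParent E ((1 + k : Nat) : Int) = (E.getD k (0, 0)).1 := getParent_at E 1 k hsnd hklt
    have hmem : E.getD k (0, 0) ∈ E := by
      rw [List.getD_eq_getElem?_getD, List.getElem?_eq_getElem hklt]
      exact List.getElem_mem _
    have hge : 0 ≤ (E.getD k (0, 0)).1 := hfst _ hmem
    have hcond : (getParent E ((1 + k : Nat) : Int) != -1) = true := by
      rw [hgp]; exact bne_iff_ne.mpr (by omega)
    rw [EtoVTreeAux_succ]
    simp only [hcond, if_true]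
    have hcast : ((1 + k : Nat) : Int) + 1 = ((1 + (k + 1) : Nat) : Int) := by push_cast; ring
    rw [hgp, hcast, ih (k + 1) _ (by omega)]
    have hdrop : (E.drop k).map Prod.fst = (E.getD k (0, 0)).1 :: (E.drop (k + 1)).map Prod.fst := by
      rw [List.drop_eq_getElem_cons hklt, List.map_cons]
      congr 1
      simp [List.getD_eq_getElem?_getD, List.getElem?_eq_getElem hklt]
    rw [hdrop]
    simp

lemma EtoVTree_eq_map_fst (E : List (Int × Int))
    (hsnd : E.map Prod.snd = (List.range' 1 E.length).map Int.ofNat)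
    (hfst : ∀ e ∈ E, 0 ≤ e.1) : EtoVTree E = E.map Prod.fst := by
  have := etv_aux E hsnd hfst E.length 0 [] (by omega)
  simpa [EtoVTree] using this

lemma main_eq (VTree2 : List Int) (root : Int) :
    VTree2ToVTree1 VTree2 root = VTree2ToVTree1_alt VTree2 root := by
  have hchild := children_eq VTree2 root
  -- the first iteration of each loop reduces definitionally (empty table, singleton queue)
  have hA : bfsA VTree2 (VTree2.length + 2) [root] PySem.Dict.empty [] 0
      = bfsA VTree2 (VTree2.length + 1) (getChilrenByVTree VTree2 root)
          ((getChilrenByVTree VTree2 root).foldl (stepA root) (PySem.Dict.empty.insert root 0, [], 1)).1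
          ((getChilrenByVTree VTree2 root).foldl (stepA root) (PySem.Dict.empty.insert root 0, [], 1)).2.1
          ((getChilrenByVTree VTree2 root).foldl (stepA root) (PySem.Dict.empty.insert root 0, [], 1)).2.2 := rfl
  have hB : bfsB (childrenMap VTree2) (VTree2.length + 2) [root] 0 (PySem.Dict.empty.insert root 0) [] 1
      = bfsB (childrenMap VTree2) (VTree2.length + 1) ([root] ++ (childrenMap VTree2).getD root []) 1
          (((childrenMap VTree2).getD root []).foldl (stepB root) (PySem.Dict.empty.insert root 0, [], 1)).1
          (((childrenMap VTree2).getD root []).foldl (stepB root) (PySem.Dict.empty.insert root 0, [], 1)).2.1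
          (((childrenMap VTree2).getD root []).foldl (stepB root) (PySem.Dict.empty.insert root 0, [], 1)).2.2 := rfl
  unfold VTree2ToVTree1 VTree2ToVTree1_alt
  rw [hA, hB, hchild]
  have hfold := fold_eq root (getChilrenByVTree VTree2 root) (PySem.Dict.empty.insert root 0) [] 1
  simp only [List.map_nil] at hfold
  rw [hfold]
  set sA := (getChilrenByVTree VTree2 root).foldl (stepA root)
      (PySem.Dict.empty.insert root 0, ([] : List (Int × Int)), (1 : Int)) with hsA
  have hcont : ∀ v ∈ getChilrenByVTree VTree2 root, sA.1.contains v = true := by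
    intro v hv
    exact fold_contains_children _ _ _ _ hv
  have hct1 : ∀ v : Int, 0 ≤ (PySem.Dict.empty.insert root (0 : Int)).getD v 0 := by
    intro v
    rw [PySem.Dict.getD_insert]
    split_ifs <;> simp [PySem.Dict.getD_empty]
  obtain ⟨g0, g1, g2, g3⟩ := fold_snd root (getChilrenByVTree VTree2 root)
      (PySem.Dict.empty.insert root 0) [] 1 hct1 (by simp) (by simp) (by simp)
  obtain ⟨hsnd, hfst⟩ := bfsA_snd VTree2 (VTree2.length + 1)
      (getChilrenByVTree VTree2 root) sA.1 sA.2.1 sA.2.2 hcont g0 g1 g2 g3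
  rw [EtoVTree_eq_map_fst _ hsnd hfst]
  exact (bfs_eq VTree2 (VTree2.length + 1) (getChilrenByVTree VTree2 root) [root]
      sA.1 sA.2.1 sA.2.2 hcont).symm

-- ===== VERDICT (by name: the statement is the Claim_ definition above) =====
theorem VTree2ToVTree1_spec : Claim_equal_VTree2ToVTree1 := by
  intro VTree2 root _
  unfold Spec_VTree2ToVTree1
  exact main_eq VTree2 root
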